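-- pv_equiv track=rewrite | github.com/matthewjesusguzman1-hash/thrify-curator | scripts/auto_crop_elp_signs.py | runs
-- ===== SOURCE A (Python) =====
-- def runs(mask, min_gap=6, min_len=20):
--     """Return list of (start, end) runs of consecutive True values."""
--     out = []
--     inside = False
--     s = 0
--     for i, v in enumerate(mask):
--         if v and not inside:
--             inside = True; s = i
--         elif not v and inside:
--             inside = False
--             if i - s >= min_len: out.append((s, i))
--     if inside and len(mask) - s >= min_len:
--         out.append((s, len(mask)))
--     # Merge runs separated by < min_gap
--     merged = []
--     for r in out:
--         if merged and r[0] - merged[-1][1] < min_gap: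
--             merged[-1] = (merged[-1][0], r[1])
--         else:
--             merged.append(r)
--     return merged
-- ===== SOURCE B (Python) =====
-- def runs(mask, min_gap=6, min_len=20):
--     """Return list of (start, end) runs of consecutive True values."""
--     b = [bool(v) for v in mask]
--     pre = [False] + b          # value before position i
--     ext = b + [False]          # value at position i (with a sentinel after the end)
--     starts = [i for i, (p, c) in enumerate(zip(pre, ext)) if c and not p]
--     ends = [i for i, (p, c) in enumerate(zip(pre, ext)) if p and not c]
--     kept = [(s, e) for s, e in zip(starts, ends) if e - s >= min_len]
--     if not kept:
--         return []
--     cur_s, cur_e = kept[0]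
--     merged = []
--     for s, e in kept[1:]:
--         if s - cur_e < min_gap:
--             cur_e = e
--         else:
--             merged.append((cur_s, cur_e))
--             cur_s, cur_e = s, e
--     merged.append((cur_s, cur_e))
--     return merged
-- ===== Notes on version B (the rewrite author's own statement) =====
-- stated objective: alternative
-- what changed: Replaces A's single stateful scan with staged boundary detection: pad the mask with sentinels, find run starts and ends as rising/falling edges via two comprehensions over zip(pre, ext), pair them with zip, filter by min_len, then merge with a current-interval accumulator instead of rewriting merged[-1].
import Mathlib
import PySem

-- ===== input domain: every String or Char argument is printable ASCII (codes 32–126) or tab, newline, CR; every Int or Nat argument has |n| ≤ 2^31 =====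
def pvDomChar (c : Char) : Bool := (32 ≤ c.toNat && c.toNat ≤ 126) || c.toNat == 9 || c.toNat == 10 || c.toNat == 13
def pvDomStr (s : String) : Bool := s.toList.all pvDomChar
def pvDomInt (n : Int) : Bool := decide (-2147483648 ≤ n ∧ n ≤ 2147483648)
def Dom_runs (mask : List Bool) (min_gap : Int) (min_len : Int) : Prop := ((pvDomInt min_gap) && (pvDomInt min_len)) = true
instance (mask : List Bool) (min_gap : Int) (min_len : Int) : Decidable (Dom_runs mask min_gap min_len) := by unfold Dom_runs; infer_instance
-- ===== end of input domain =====

-- B replaces A's single stateful scan with staged edge detection (run starts and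
-- ends found as rising/falling edges of the sentinel-padded mask, paired by zip,
-- filtered by min_len) and a current-interval merge; objective: alternative, same O(n).

-- ===== PORT A =====
-- 'for i, v in enumerate(mask)' with state (out, inside, s)
def runsA_loop (min_len : Int) : List Bool → Int → List (Int × Int) → Bool → Int →
    List (Int × Int) × Bool × Int
  | [], _, out, inside, s => (out, inside, s)
  | v :: rest, i, out, inside, s =>
    if v && !inside then runsA_loop min_len rest (i + 1) out true i
    else if !v && inside then
      runsA_loop min_len rest (i + 1)
        (if i - s ≥ min_len then out ++ [(s, i)] else out) false s
    else runsA_loop min_len rest (i + 1) out inside s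

-- the merge loop of A: 'merged' kept in reverse order, reversed at the end
def runsA_merge (min_gap : Int) : List (Int × Int) → List (Int × Int) → List (Int × Int)
  | acc, [] => acc.reverse
  | acc, r :: rest =>
    match acc with
    | (a, b) :: accTail =>
      if r.1 - b < min_gap then runsA_merge min_gap ((a, r.2) :: accTail) rest
      else runsA_merge min_gap (r :: acc) rest
    | [] => runsA_merge min_gap [r] rest

def runs (mask : List Bool) (min_gap : Int) (min_len : Int) : List (Int × Int) :=
  let (out, inside, s) := runsA_loop min_len mask 0 [] false 0
  let out := if inside && decide ((mask.length : Int) - s ≥ min_len) then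
      out ++ [(s, (mask.length : Int))] else out
  runsA_merge min_gap [] out

-- ===== PORT B =====
-- B's merge loop: current interval (cur_s, cur_e) plus the list built so far
def runsB_merge (min_gap : Int) : Int → Int → List (Int × Int) → List (Int × Int) → List (Int × Int)
  | curS, curE, merged, [] => merged ++ [(curS, curE)]
  | curS, curE, merged, (s, e) :: rest =>
    if s - curE < min_gap then runsB_merge min_gap curS e merged rest
    else runsB_merge min_gap s e (merged ++ [(curS, curE)]) rest

def runs_alt (mask : List Bool) (min_gap : Int) (min_len : Int) : List (Int × Int) :=
  let pre := false :: mask                     -- [False] + b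
  let ext := mask ++ [false]                   -- b + [False]
  let pairs := PySem.List.enumerate (pre.zip ext)
  let starts := (pairs.filter (fun x => x.2.2 && !x.2.1)).map (fun x => x.1)
  let ends := (pairs.filter (fun x => x.2.1 && !x.2.2)).map (fun x => x.1)
  let kept := (starts.zip ends).filter (fun r => decide (r.2 - r.1 ≥ min_len))
  match kept with
  | [] => []
  | (s, e) :: rest => runsB_merge min_gap s e [] rest

-- ===== PRECONDITION & SPEC =====
def Spec_runs (mask : List Bool) (min_gap : Int) (min_len : Int) (out : List (Int × Int)) : Prop := out = runs_alt mask min_gap min_len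
instance (mask : List Bool) (min_gap : Int) (min_len : Int) (out : List (Int × Int)) : Decidable (Spec_runs mask min_gap min_len out) := by unfold Spec_runs; infer_instance

-- ===== CLAIM (what is proved, stated in full; the proofs are below) =====
def Claim_equal_runs : Prop := ∀ (mask : List Bool) (min_gap : Int) (min_len : Int), Dom_runs mask min_gap min_len → Spec_runs mask min_gap min_len (runs mask min_gap min_len)

-- ===== LEMMAS AND PROOFS =====

-- reference recursions for B's edge lists: start/end indices given the previous bit p
def Sidx (p : Bool) (i : Int) : List Bool → List Int
  | [] => []
  | v :: r => if v && !p then i :: Sidx v (i + 1) r else Sidx v (i + 1) r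

def Eidx (p : Bool) (i : Int) : List Bool → List Int
  | [] => if p then [i] else []
  | v :: r => if p && !v then i :: Eidx v (i + 1) r else Eidx v (i + 1) r

-- the pre-merge result of port A, with the trailing-run flush expressed at position i
def finA (min_len : Int) (mask : List Bool) (i : Int) (out : List (Int × Int))
    (inside : Bool) (s : Int) : List (Int × Int) :=
  match runsA_loop min_len mask i out inside s with
  | (o, ins, s') =>
    if ins && decide (i + (mask.length : Int) - s' ≥ min_len) then
      o ++ [(s', i + (mask.length : Int))] else o

lemma runs_eq_finA (mask : List Bool) (min_gap min_len : Int) :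
    runs mask min_gap min_len = runsA_merge min_gap [] (finA min_len mask 0 [] false 0) := by
  unfold runs finA
  rcases runsA_loop min_len mask 0 [] false 0 with ⟨o, ins, s'⟩
  simp

lemma finA_nil (m i : Int) (out : List (Int × Int)) (inside : Bool) (s : Int) :
    finA m [] i out inside s =
      if inside && decide (i - s ≥ m) then out ++ [(s, i)] else out := by
  unfold finA runsA_loop
  simp

lemma finA_cons (m : Int) (v : Bool) (rest : List Bool) (i : Int) (out : List (Int × Int))
    (inside : Bool) (s : Int) :
    finA m (v :: rest) i out inside s =
      if v && !inside then finA m rest (i + 1) out true i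
      else if !v && inside then
        finA m rest (i + 1) (if i - s ≥ m then out ++ [(s, i)] else out) false s
      else finA m rest (i + 1) out inside s := by
  unfold finA
  rw [runsA_loop]
  have hlen : (((v :: rest).length : Nat) : Int) = (rest.length : Int) + 1 := by simp
  simp only [hlen]
  have hpos : i + ((rest.length : Int) + 1) = (i + 1) + (rest.length : Int) := by ring
  simp only [hpos]
  split_ifs <;> rfl

-- combined invariant: finA equals the min_len-filtered zip of the edge lists
lemma finA_edges (m : Int) (mask : List Bool) :
    (∀ (i : Int) (out : List (Int × Int)) (s : Int),
        finA m mask i out false s =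
          out ++ ((Sidx false i mask).zip (Eidx false i mask)).filter
            (fun r => decide (r.2 - r.1 ≥ m))) ∧
    (∀ (i : Int) (out : List (Int × Int)) (s : Int),
        finA m mask i out true s =
          out ++ ((s :: Sidx true i mask).zip (Eidx true i mask)).filter
            (fun r => decide (r.2 - r.1 ≥ m))) := by
  induction mask with
  | nil =>
    constructor
    · intro i out s; simp [finA_nil, Sidx, Eidx]
    · intro i out s
      simp only [finA_nil, Sidx, Eidx, Bool.true_and]
      by_cases h : i - s ≥ m
      · simp [h, List.zip, List.filter]
      · simp [h, List.zip, List.filter]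
  | cons v rest ih =>
    obtain ⟨ih1, ih2⟩ := ih
    constructor
    · intro i out s
      rw [finA_cons]
      cases v with
      | true =>
        rw [if_pos (by decide), ih2 (i + 1) out i]
        simp [Sidx, Eidx]
      | false =>
        rw [if_neg (by decide), if_neg (by decide), ih1 (i + 1) out s]
        simp [Sidx, Eidx]
    · intro i out s
      rw [finA_cons]
      cases v with
      | true =>
        rw [if_neg (by decide), if_neg (by decide), ih2 (i + 1) out s]
        simp [Sidx, Eidx]
      | false =>
        rw [if_neg (by decide), if_pos (by decide), ih1 (i + 1) _ s]
        by_cases hc : i - s ≥ m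
        · simp [Sidx, Eidx, hc]
        · simp [Sidx, Eidx, hc]

-- bridging: the port's enumerate/filter/map expressions compute Sidx / Eidx
lemma starts_bridge (p : Bool) (l : List Bool) (k : Int) :
    ((PySem.List.enumerate ((p :: l).zip (l ++ [false])) k).filter
        (fun x => x.2.2 && !x.2.1)).map (fun x => x.1) = Sidx p k l := by
  induction l generalizing p k with
  | nil =>
    cases p <;> simp [PySem.List.enumerate_cons, PySem.List.enumerate_nil, Sidx]
  | cons v r ih =>
    have : (p :: v :: r).zip ((v :: r) ++ [false]) = (p, v) :: ((v :: r).zip (r ++ [false])) := by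
      simp
    rw [this, PySem.List.enumerate_cons]
    rw [List.filter_cons]
    by_cases h : (v && !p) = true
    · rw [if_pos h, List.map_cons, ih v (k + 1)]
      simp [Sidx, h]
    · rw [if_neg h, ih v (k + 1)]
      simp only [Sidx]
      rw [if_neg h]

lemma ends_bridge (p : Bool) (l : List Bool) (k : Int) :
    ((PySem.List.enumerate ((p :: l).zip (l ++ [false])) k).filter
        (fun x => x.2.1 && !x.2.2)).map (fun x => x.1) = Eidx p k l := by
  induction l generalizing p k with
  | nil =>
    cases p <;> simp [PySem.List.enumerate_cons, PySem.List.enumerate_nil, Eidx]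
  | cons v r ih =>
    have : (p :: v :: r).zip ((v :: r) ++ [false]) = (p, v) :: ((v :: r).zip (r ++ [false])) := by
      simp
    rw [this, PySem.List.enumerate_cons]
    rw [List.filter_cons]
    by_cases h : (p && !v) = true
    · rw [if_pos h, List.map_cons, ih v (k + 1)]
      simp [Eidx, h]
    · rw [if_neg h, ih v (k + 1)]
      simp only [Eidx]
      rw [if_neg h]

-- B's merge with a non-empty accumulator splits off the accumulator
lemma runsB_merge_acc (g : Int) (l : List (Int × Int)) (a b : Int) (acc : List (Int × Int)) :
    runsB_merge g a b acc l = acc ++ runsB_merge g a b [] l := by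
  induction l generalizing a b acc with
  | nil => simp [runsB_merge]
  | cons r rest ih =>
    rcases r with ⟨s, e⟩
    rw [runsB_merge, runsB_merge]
    by_cases h : s - b < g
    · rw [if_pos h, if_pos h]; exact ih a e acc
    · rw [if_neg h, if_neg h, ih s e (acc ++ [(a, b)]), ih s e ([] ++ [(a, b)])]
      simp

-- A's merge equals B's merge once a first interval has been taken up
lemma merge_eq (g : Int) (l : List (Int × Int)) (a b : Int) (acc : List (Int × Int)) :
    runsA_merge g ((a, b) :: acc) l = acc.reverse ++ runsB_merge g a b [] l := by
  induction l generalizing a b acc with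
  | nil => simp [runsA_merge, runsB_merge]
  | cons r rest ih =>
    rcases r with ⟨s, e⟩
    rw [runsA_merge, runsB_merge]
    by_cases h : s - b < g
    · rw [if_pos h, if_pos h, ih]
    · rw [if_neg h, if_neg h, ih, runsB_merge_acc g rest s e ([] ++ [(a, b)])]
      simp

-- ===== VERDICT (by name: the statement is the Claim_ definition above) =====
theorem runs_spec : Claim_equal_runs := by
  intro mask min_gap min_len _
  unfold Spec_runs runs_alt
  rw [runs_eq_finA, (finA_edges min_len mask).1 0 [] 0]
  simp only [List.nil_append]
  rw [← starts_bridge false mask 0, ← ends_bridge false mask 0]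
  cases h : (((((PySem.List.enumerate ((false :: mask).zip (mask ++ [false])) 0).filter
        (fun x => x.2.2 && !x.2.1)).map (fun x => x.1)).zip
      (((PySem.List.enumerate ((false :: mask).zip (mask ++ [false])) 0).filter
        (fun x => x.2.1 && !x.2.2)).map (fun x => x.1))).filter
        (fun r => decide (r.2 - r.1 ≥ min_len))) with
  | nil => simp [runsA_merge]
  | cons r rest =>
    rcases r with ⟨s, e⟩
    rw [runsA_merge, merge_eq]
    simp
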